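-- pv_equiv track=rewrite | github.com/RSRawat06/NetDetect | NetDetect/param_gen.py | gen_commands
-- ===== SOURCE A (Python) =====
-- def gen_commands(model_type_opts, s_batch_opts,
--                  n_steps_opts, v_regularization_opts,
--                  dice, total):
--   i = 0
--   for s_batch in s_batch_opts:
--     for model_type in model_type_opts:
--       for n_steps in n_steps_opts:
--         for v_regularization in v_regularization_opts:
--           i += 1
--           if i % total != dice:
--             continue
--
--           model_name = "b:%s,t:%s,s:%s,r:%s" % (s_batch, model_type, n_steps,
--                                                 v_regularization)
--           yield "python3 -m NetDetect.src.main.train " \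
--                 '--model_name="%s" ' \
--                 "--model_type=%s " \
--                 "--s_batch=%s " \
--                 "--n_steps=%s " \
--                 "--v_regularization=%s " \
--                 "--s_test=1024 " \
--                 "--s_report_interval=40 " \
--                 "--n_epochs=20 " \
--                 "--dataset=iscx " \
--                 % (model_name, model_type, s_batch, n_steps,
--                    v_regularization)
-- ===== SOURCE B (Python) =====
-- def gen_commands(model_type_opts, s_batch_opts,
--                  n_steps_opts, v_regularization_opts,
--                  dice, total):
--   # One flat loop over 1-based combination indices; each selected index is
--   # decoded in mixed radix instead of running four nested loops.
--   nb = len(s_batch_opts)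
--   nm = len(model_type_opts)
--   nn = len(n_steps_opts)
--   nv = len(v_regularization_opts)
--   for i in range(1, nb * nm * nn * nv + 1):
--     if i % total != dice:
--       continue
--     p = i - 1
--     v_regularization = v_regularization_opts[p % nv]
--     p //= nv
--     n_steps = n_steps_opts[p % nn]
--     p //= nn
--     model_type = model_type_opts[p % nm]
--     p //= nm
--     s_batch = s_batch_opts[p]
--     model_name = "b:%s,t:%s,s:%s,r:%s" % (s_batch, model_type, n_steps,
--                                           v_regularization)
--     yield "python3 -m NetDetect.src.main.train " \
--           '--model_name="%s" ' \
--           "--model_type=%s " \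
--           "--s_batch=%s " \
--           "--n_steps=%s " \
--           "--v_regularization=%s " \
--           "--s_test=1024 " \
--           "--s_report_interval=40 " \
--           "--n_epochs=20 " \
--           "--dataset=iscx " \
--           % (model_name, model_type, s_batch, n_steps,
--              v_regularization)
-- ===== Notes on version B (the rewrite author's own statement) =====
-- stated objective: alternative
-- what changed: B replaces A's four nested loops over the option lists by one flat loop over combination indices 1..N (N = product of the list lengths), decoding each selected index in mixed radix (v_regularization least significant, then n_steps, model_type, s_batch) to fetch the four option values; Pre_ excludes only total == 0 with all four lists non-empty, where A's first 'i % total' raises ZeroDivisionError.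
import Mathlib
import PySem

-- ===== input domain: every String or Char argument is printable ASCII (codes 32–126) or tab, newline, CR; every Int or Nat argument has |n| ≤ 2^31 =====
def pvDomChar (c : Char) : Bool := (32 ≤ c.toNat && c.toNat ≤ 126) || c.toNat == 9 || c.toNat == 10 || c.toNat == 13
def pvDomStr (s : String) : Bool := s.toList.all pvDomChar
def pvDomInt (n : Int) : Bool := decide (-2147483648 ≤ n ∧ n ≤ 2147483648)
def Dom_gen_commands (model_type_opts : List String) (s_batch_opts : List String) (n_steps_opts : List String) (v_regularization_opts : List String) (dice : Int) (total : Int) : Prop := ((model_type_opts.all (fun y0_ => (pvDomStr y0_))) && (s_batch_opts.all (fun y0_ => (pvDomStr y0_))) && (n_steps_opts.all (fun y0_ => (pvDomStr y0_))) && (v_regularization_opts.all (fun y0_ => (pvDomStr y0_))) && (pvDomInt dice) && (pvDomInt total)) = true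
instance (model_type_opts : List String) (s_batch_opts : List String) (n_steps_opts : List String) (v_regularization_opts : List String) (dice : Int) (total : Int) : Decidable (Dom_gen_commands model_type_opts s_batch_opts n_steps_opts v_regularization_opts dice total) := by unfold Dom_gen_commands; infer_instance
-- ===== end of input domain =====

-- B replaces A's four nested loops + counter by one flat loop over combination indices,
-- decoding each selected index in mixed radix (objective: alternative algorithm).

-- Both Pythons format the identical command string ("%s" on str is concatenation); shared helper.
def pvCmd (s_batch model_type n_steps v_regularization : String) : String :=
  let model_name := "b:" ++ s_batch ++ ",t:" ++ model_type ++ ",s:" ++ n_steps ++ ",r:" ++ v_regularization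
  "python3 -m NetDetect.src.main.train --model_name=\"" ++ model_name ++ "\" --model_type=" ++
    model_type ++ " --s_batch=" ++ s_batch ++ " --n_steps=" ++ n_steps ++
    " --v_regularization=" ++ v_regularization ++
    " --s_test=1024 --s_report_interval=40 --n_epochs=20 --dataset=iscx "

-- ===== PORT A =====
def gen_commands (model_type_opts : List String) (s_batch_opts : List String) (n_steps_opts : List String) (v_regularization_opts : List String) (dice : Int) (total : Int) : List String :=
  (s_batch_opts.foldl (fun st0 s_batch =>
    model_type_opts.foldl (fun st1 model_type =>
      n_steps_opts.foldl (fun st2 n_steps =>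
        v_regularization_opts.foldl (fun (st3 : Int × List String) v_regularization =>
          let i := st3.1 + 1
          if PySem.Int.mod i total ≠ dice then (i, st3.2)
          else (i, st3.2 ++ [pvCmd s_batch model_type n_steps v_regularization])) st2) st1) st0)
    ((0 : Int), ([] : List String))).2

-- ===== PORT B =====
def gen_commands_alt (model_type_opts : List String) (s_batch_opts : List String) (n_steps_opts : List String) (v_regularization_opts : List String) (dice : Int) (total : Int) : List String :=
  let nb : Int := s_batch_opts.length
  let nm : Int := model_type_opts.length
  let nn : Int := n_steps_opts.length
  let nv : Int := v_regularization_opts.length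
  (PySem.List.pyRange 1 (nb * nm * nn * nv + 1) 1).foldl (fun acc i =>
    if PySem.Int.mod i total ≠ dice then acc
    else
      let p0 := i - 1
      let v_regularization := PySem.List.pyGetD v_regularization_opts (PySem.Int.mod p0 nv) ""
      let p1 := PySem.Int.floordiv p0 nv
      let n_steps := PySem.List.pyGetD n_steps_opts (PySem.Int.mod p1 nn) ""
      let p2 := PySem.Int.floordiv p1 nn
      let model_type := PySem.List.pyGetD model_type_opts (PySem.Int.mod p2 nm) ""
      let p3 := PySem.Int.floordiv p2 nm
      let s_batch := PySem.List.pyGetD s_batch_opts p3 ""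
      acc ++ [pvCmd s_batch model_type n_steps v_regularization]) []

-- ===== PRECONDITION & SPEC =====
-- Pre_ excludes only the inputs where Python A raises: total == 0 while all four lists are
-- non-empty (the first 'i % total' is a ZeroDivisionError there).
def Pre_gen_commands (model_type_opts : List String) (s_batch_opts : List String) (n_steps_opts : List String) (v_regularization_opts : List String) (dice : Int) (total : Int) : Prop :=
  total ≠ 0 ∨ model_type_opts = [] ∨ s_batch_opts = [] ∨ n_steps_opts = [] ∨ v_regularization_opts = []
instance (model_type_opts : List String) (s_batch_opts : List String) (n_steps_opts : List String) (v_regularization_opts : List String) (dice : Int) (total : Int) : Decidable (Pre_gen_commands model_type_opts s_batch_opts n_steps_opts v_regularization_opts dice total) := by unfold Pre_gen_commands; infer_instance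

def pvWitness_gen_commands : List String × List String × List String × List String × Int × Int :=
  (["rnn"], ["16", "32"], ["8"], ["0.1"], 0, 2)

def Spec_gen_commands (model_type_opts : List String) (s_batch_opts : List String) (n_steps_opts : List String) (v_regularization_opts : List String) (dice : Int) (total : Int) (out : List String) : Prop := out = gen_commands_alt model_type_opts s_batch_opts n_steps_opts v_regularization_opts dice total
instance (model_type_opts : List String) (s_batch_opts : List String) (n_steps_opts : List String) (v_regularization_opts : List String) (dice : Int) (total : Int) (out : List String) : Decidable (Spec_gen_commands model_type_opts s_batch_opts n_steps_opts v_regularization_opts dice total out) := by unfold Spec_gen_commands; infer_instance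

-- ===== CLAIM (what is proved, stated in full; the proofs are below) =====
def Claim_equal_gen_commands : Prop := ∀ (model_type_opts : List String) (s_batch_opts : List String) (n_steps_opts : List String) (v_regularization_opts : List String) (dice : Int) (total : Int), Dom_gen_commands model_type_opts s_batch_opts n_steps_opts v_regularization_opts dice total → Pre_gen_commands model_type_opts s_batch_opts n_steps_opts v_regularization_opts dice total → Spec_gen_commands model_type_opts s_batch_opts n_steps_opts v_regularization_opts dice total (gen_commands model_type_opts s_batch_opts n_steps_opts v_regularization_opts dice total)
-- ===== LEMMAS AND PROOFS =====

-- A's loop body over one yielded-or-skipped combination, as a fold step.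
def pvF (total dice : Int) : (Int × List String) → String → (Int × List String) :=
  fun st3 c =>
    let i := st3.1 + 1
    if PySem.Int.mod i total ≠ dice then (i, st3.2) else (i, st3.2 ++ [c])

-- The full product of combinations in A's visiting order.
def pvQuads (model_type_opts s_batch_opts n_steps_opts v_regularization_opts : List String) : List String :=
  s_batch_opts.flatMap fun s => model_type_opts.flatMap fun m =>
    n_steps_opts.flatMap fun n => v_regularization_opts.map fun v => pvCmd s m n v

theorem pvA_eq_foldl (mt sb ns vr : List String) (dice total : Int) :
    gen_commands mt sb ns vr dice total = ((pvQuads mt sb ns vr).foldl (pvF total dice) (0, [])).2 := by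
  simp only [gen_commands, pvQuads, pvF, List.foldl_flatMap, List.foldl_map]

def pvPick (total dice : Int) : List String → Int → List String
  | [], _ => []
  | c :: t, i0 => (if PySem.Int.mod (i0 + 1) total = dice then [c] else []) ++ pvPick total dice t (i0 + 1)

theorem pvFoldl_pick (total dice : Int) :
    ∀ (L : List String) (i0 : Int) (acc : List String),
      L.foldl (pvF total dice) (i0, acc) = (i0 + L.length, acc ++ pvPick total dice L i0) := by
  intro L
  induction L with
  | nil => intro i0 acc; simp [pvPick]
  | cons c t ih =>
      intro i0 acc
      simp only [List.foldl_cons, pvF, pvPick]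
      by_cases h : PySem.Int.mod (i0 + 1) total = dice
      · rw [if_neg (by simp [h]), if_pos h]
        rw [ih]
        simp only [Prod.mk.injEq, List.append_assoc, List.length_cons, List.nil_append,
          and_true, true_and]
        push_cast; ring
      · rw [if_pos h, if_neg h]
        rw [ih]
        simp only [Prod.mk.injEq, List.append_assoc, List.length_cons, List.nil_append,
          and_true, true_and]
        push_cast; ring

-- cons-shift of pyGetD at a positive in-range index
theorem pvGetD_cons_pos (c : String) (t : List String) (j : Int) (h1 : 1 ≤ j)
    (h2 : j ≤ (t.length : Int)) :
    PySem.List.pyGetD (c :: t) j "" = PySem.List.pyGetD t (j - 1) "" := by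
  rw [PySem.List.pyGetD_eq_getElem _ _ (by omega) (by simp only [List.length_cons]; push_cast; omega),
      PySem.List.pyGetD_eq_getElem _ _ (by omega) (by omega)]
  have hj : j.toNat = (j - 1).toNat + 1 := by omega
  simp only [hj, List.getElem_cons_succ]

theorem pvPick_eq_map_filter (total dice : Int) :
    ∀ (L : List String) (i0 : Int),
      pvPick total dice L i0 =
        ((PySem.List.pyRange (i0 + 1) (i0 + 1 + L.length) 1).filter
            (fun i => decide (PySem.Int.mod i total = dice))).map
          (fun i => PySem.List.pyGetD L (i - i0 - 1) "") := by
  intro L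
  induction L with
  | nil =>
      intro i0
      rw [show (i0 + 1 + (((([] : List String)).length : Int))) = i0 + 1 by simp]
      rw [PySem.List.pyRange_one_eq_nil (le_refl _)]
      simp [pvPick]
  | cons c t ih =>
      intro i0
      rw [show (i0 + 1 + ((((c :: t)).length : Int))) = i0 + 2 + (t.length : Int) by
        simp only [List.length_cons]; push_cast; ring]
      rw [PySem.List.pyRange_one_cons (by omega)]
      rw [show i0 + 1 + 1 = i0 + 2 by ring]
      have htail :
          ((PySem.List.pyRange (i0 + 2) (i0 + 2 + (t.length : Int)) 1).filter
              (fun i => decide (PySem.Int.mod i total = dice))).map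
            (fun i => PySem.List.pyGetD (c :: t) (i - i0 - 1) "") = pvPick total dice t (i0 + 1) := by
        rw [ih (i0 + 1)]
        rw [show (i0 + 1 + 1) = i0 + 2 by ring]
        apply List.map_congr_left
        intro i hi
        have hmem := (List.mem_filter.mp hi).1
        rw [PySem.List.mem_pyRange_one] at hmem
        rw [pvGetD_cons_pos c t (i - i0 - 1) (by omega) (by omega)]
        congr 1
        ring
      simp only [List.filter_cons, pvPick]
      by_cases h : PySem.Int.mod (i0 + 1) total = dice
      · rw [if_pos h, if_pos (by simpa using h)]
        simp only [List.map_cons, htail]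
        rw [show i0 + 1 - i0 - 1 = (0 : Int) by ring, PySem.List.pyGetD_zero_cons]
        simp
      · rw [if_neg h, if_neg (by simpa using h)]
        simp only [htail, List.nil_append]

theorem pvLength_flatMap_const {α β : Type} (L : List α) (f : α → List β) (k : Nat)
    (hk : ∀ x ∈ L, (f x).length = k) : (L.flatMap f).length = L.length * k := by
  induction L with
  | nil => simp
  | cons a t ih =>
      simp only [List.flatMap_cons, List.length_append, List.length_cons,
        hk a List.mem_cons_self, ih (fun x hx => hk x (List.mem_cons_of_mem _ hx))]
      ring

theorem pvGetD_flatMap_const {α β : Type} [Inhabited α] (L : List α) (f : α → List β) (k : Nat)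
    (hk : ∀ x ∈ L, (f x).length = k) :
    ∀ (p : Nat), p < L.length * k → ∀ (d : β),
      (L.flatMap f).getD p d = (f (L.getD (p / k) default)).getD (p % k) d := by
  induction L with
  | nil => intro p hp d; simp at hp
  | cons a t ih =>
      intro p hp d
      have hm : (a :: t).length * k = t.length * k + k := by
        simp only [List.length_cons]; ring
      rw [hm] at hp
      have hk0 : 0 < k := by
        rcases Nat.eq_zero_or_pos k with h | h
        · subst h; simp at hp
        · exact h
      have hlen : (f a).length = k := hk a List.mem_cons_self
      rw [List.flatMap_cons]
      by_cases hpk : p < k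
      · rw [List.getD_append _ _ _ _ (by rw [hlen]; exact hpk)]
        rw [Nat.div_eq_of_lt hpk, Nat.mod_eq_of_lt hpk, List.getD_cons_zero]
      · rw [Nat.not_lt] at hpk
        rw [List.getD_append_right _ _ _ _ (by rw [hlen]; exact hpk), hlen]
        rw [Nat.div_eq_sub_div hk0 hpk, Nat.mod_eq_sub_mod hpk, List.getD_cons_succ]
        exact ih (fun x hx => hk x (List.mem_cons_of_mem _ hx)) (p - k) (by omega) d

theorem pvQuads_getD (mt sb ns vr : List String) (P : Nat)
    (hP : P < sb.length * mt.length * ns.length * vr.length) :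
    (pvQuads mt sb ns vr).getD P "" =
      pvCmd (sb.getD (P / vr.length / ns.length / mt.length) "")
        (mt.getD (P / vr.length / ns.length % mt.length) "")
        (ns.getD (P / vr.length % ns.length) "")
        (vr.getD (P % vr.length) "") := by
  have hnv : 0 < vr.length := by
    rcases Nat.eq_zero_or_pos vr.length with h | h
    · rw [h] at hP; simp at hP
    · exact h
  have hns : 0 < ns.length := by
    rcases Nat.eq_zero_or_pos ns.length with h | h
    · rw [h] at hP; simp at hP
    · exact h
  have hnm : 0 < mt.length := by
    rcases Nat.eq_zero_or_pos mt.length with h | h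
    · rw [h] at hP; simp at hP
    · exact h
  have hp1 : P < sb.length * (mt.length * (ns.length * vr.length)) := by
    have he : sb.length * (mt.length * (ns.length * vr.length))
        = sb.length * mt.length * ns.length * vr.length := by ring
    omega
  have hK1pos : 0 < mt.length * (ns.length * vr.length) := by positivity
  have hK2pos : 0 < ns.length * vr.length := by positivity
  have hp2 : P % (mt.length * (ns.length * vr.length)) < mt.length * (ns.length * vr.length) :=
    Nat.mod_lt _ hK1pos
  have hp3 : P % (mt.length * (ns.length * vr.length)) % (ns.length * vr.length)
      < ns.length * vr.length := Nat.mod_lt _ hK2pos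
  have hp4 : P % (mt.length * (ns.length * vr.length)) % (ns.length * vr.length) % vr.length
      < vr.length := Nat.mod_lt _ hnv
  unfold pvQuads
  rw [pvGetD_flatMap_const sb _ (mt.length * (ns.length * vr.length))
      (fun s _ => pvLength_flatMap_const _ _ _
        (fun m _ => pvLength_flatMap_const _ _ _ (fun n _ => by simp))) P hp1 ""]
  rw [pvGetD_flatMap_const mt _ (ns.length * vr.length)
      (fun m _ => pvLength_flatMap_const _ _ _ (fun n _ => by simp)) _ hp2 ""]
  rw [pvGetD_flatMap_const ns _ vr.length (fun n _ => by simp) _ hp3 ""]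
  rw [List.getD_eq_getElem _ _ (by simpa using hp4), List.getElem_map,
      ← List.getD_eq_getElem _ ("" : String) (by simpa using hp4)]
  have hdvd21 : (ns.length * vr.length) ∣ (mt.length * (ns.length * vr.length)) :=
    ⟨mt.length, by ring⟩
  have hdvdv2 : vr.length ∣ (ns.length * vr.length) := ⟨ns.length, by ring⟩
  have e1 : P / (mt.length * (ns.length * vr.length)) = P / vr.length / ns.length / mt.length := by
    rw [Nat.div_div_eq_div_mul, Nat.div_div_eq_div_mul]
    congr 1
    ring
  have e2 : P % (mt.length * (ns.length * vr.length)) / (ns.length * vr.length)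
      = P / vr.length / ns.length % mt.length := by
    rw [show mt.length * (ns.length * vr.length) = (ns.length * vr.length) * mt.length by ring,
      Nat.mod_mul_right_div_self, Nat.div_div_eq_div_mul]
    congr 2
    ring
  have e3 : P % (mt.length * (ns.length * vr.length)) % (ns.length * vr.length) / vr.length
      = P / vr.length % ns.length := by
    rw [Nat.mod_mod_of_dvd _ hdvd21,
      show ns.length * vr.length = vr.length * ns.length by ring, Nat.mod_mul_right_div_self]
  have e4 : P % (mt.length * (ns.length * vr.length)) % (ns.length * vr.length) % vr.length
      = P % vr.length := by
    rw [Nat.mod_mod_of_dvd _ hdvd21, Nat.mod_mod_of_dvd _ hdvdv2]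
  rw [e1, e2, e3, e4]
  rfl

theorem pvQuads_length (mt sb ns vr : List String) :
    (pvQuads mt sb ns vr).length = sb.length * mt.length * ns.length * vr.length := by
  have h := pvLength_flatMap_const sb
    (fun s => mt.flatMap fun m => ns.flatMap fun n => vr.map fun v => pvCmd s m n v)
    (mt.length * (ns.length * vr.length))
    (fun s _ => pvLength_flatMap_const _ _ _
      (fun m _ => pvLength_flatMap_const _ _ _ (fun n _ => by simp)))
  unfold pvQuads
  rw [h]
  ring

theorem pvDecode_eq (mt sb ns vr : List String) (i : Int) (h1 : 1 ≤ i)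
    (h2 : i ≤ (sb.length : Int) * (mt.length : Int) * (ns.length : Int) * (vr.length : Int)) :
    pvCmd
      (PySem.List.pyGetD sb
        (PySem.Int.floordiv (PySem.Int.floordiv (PySem.Int.floordiv (i - 1) (vr.length : Int))
          (ns.length : Int)) (mt.length : Int)) "")
      (PySem.List.pyGetD mt
        (PySem.Int.mod (PySem.Int.floordiv (PySem.Int.floordiv (i - 1) (vr.length : Int))
          (ns.length : Int)) (mt.length : Int)) "")
      (PySem.List.pyGetD ns
        (PySem.Int.mod (PySem.Int.floordiv (i - 1) (vr.length : Int)) (ns.length : Int)) "")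
      (PySem.List.pyGetD vr (PySem.Int.mod (i - 1) (vr.length : Int)) "")
    = PySem.List.pyGetD (pvQuads mt sb ns vr) (i - 1) "" := by
  have hPi : (((i - 1).toNat : Nat) : Int) = i - 1 := by omega
  have hcast : ((sb.length * mt.length * ns.length * vr.length : Nat) : Int)
      = (sb.length : Int) * (mt.length : Int) * (ns.length : Int) * (vr.length : Int) := by
    push_cast; ring
  have hPlt : (i - 1).toNat < sb.length * mt.length * ns.length * vr.length := by
    have : (((i - 1).toNat : Nat) : Int) < ((sb.length * mt.length * ns.length * vr.length : Nat) : Int) := by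
      rw [hPi, hcast]; omega
    exact_mod_cast this
  rw [← hPi]
  simp only [PySem.Int.mod_natCast, PySem.Int.floordiv_natCast, PySem.List.pyGetD_natCast]
  exact (pvQuads_getD mt sb ns vr (i - 1).toNat hPlt).symm

-- ===== VERDICT (by name: the statement is the Claim_ definition above) =====
theorem gen_commands_spec : Claim_equal_gen_commands := by
  intro mt sb ns vr dice total _ _
  unfold Spec_gen_commands
  rw [pvA_eq_foldl, pvFoldl_pick]
  simp only [List.nil_append]
  rw [pvPick_eq_map_filter]
  unfold gen_commands_alt
  have hB :
      (PySem.List.pyRange 1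
          ((sb.length : Int) * (mt.length : Int) * (ns.length : Int) * (vr.length : Int) + 1) 1).foldl
        (fun acc i =>
          if PySem.Int.mod i total ≠ dice then acc
          else acc ++ [pvCmd
            (PySem.List.pyGetD sb
              (PySem.Int.floordiv (PySem.Int.floordiv (PySem.Int.floordiv (i - 1) (vr.length : Int))
                (ns.length : Int)) (mt.length : Int)) "")
            (PySem.List.pyGetD mt
              (PySem.Int.mod (PySem.Int.floordiv (PySem.Int.floordiv (i - 1) (vr.length : Int))
                (ns.length : Int)) (mt.length : Int)) "")
            (PySem.List.pyGetD ns
              (PySem.Int.mod (PySem.Int.floordiv (i - 1) (vr.length : Int)) (ns.length : Int)) "")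
            (PySem.List.pyGetD vr (PySem.Int.mod (i - 1) (vr.length : Int)) "")]) []
      = ((PySem.List.pyRange 1
            ((sb.length : Int) * (mt.length : Int) * (ns.length : Int) * (vr.length : Int) + 1) 1).filter
          (fun i => decide (PySem.Int.mod i total = dice))).map
        (fun i => pvCmd
            (PySem.List.pyGetD sb
              (PySem.Int.floordiv (PySem.Int.floordiv (PySem.Int.floordiv (i - 1) (vr.length : Int))
                (ns.length : Int)) (mt.length : Int)) "")
            (PySem.List.pyGetD mt
              (PySem.Int.mod (PySem.Int.floordiv (PySem.Int.floordiv (i - 1) (vr.length : Int))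
                (ns.length : Int)) (mt.length : Int)) "")
            (PySem.List.pyGetD ns
              (PySem.Int.mod (PySem.Int.floordiv (i - 1) (vr.length : Int)) (ns.length : Int)) "")
            (PySem.List.pyGetD vr (PySem.Int.mod (i - 1) (vr.length : Int)) "")) := by
    simp only [ne_eq, ite_not]
    rw [PySem.List.foldl_append_ite, List.nil_append]
  simp only []
  rw [hB]
  have hN : (0 : Int) + 1 + ((pvQuads mt sb ns vr).length : Int)
      = (sb.length : Int) * (mt.length : Int) * (ns.length : Int) * (vr.length : Int) + 1 := by
    rw [pvQuads_length]; push_cast; ring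
  rw [show (0 : Int) + 1 = 1 from by ring] at hN ⊢
  rw [hN]
  apply List.map_congr_left
  intro i hi
  have hmem := (List.mem_filter.mp hi).1
  rw [PySem.List.mem_pyRange_one] at hmem
  rw [show i - 0 - 1 = i - 1 by ring]
  exact (pvDecode_eq mt sb ns vr i (by omega) (by omega)).symm
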